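-- pv_equiv track=rewrite | github.com/noahvogt/slidegen | slidegen.py | get_songtext_by_structure
-- ===== SOURCE A (Python) =====
-- def get_songtext_by_structure(content: list, structure: str) -> str:
--     found_desired_structure = False
--     output_str = ""
--
--     for line in content:
--         stripped_line = line.strip()
--         if found_desired_structure:
--             if stripped_line.startswith("[") and stripped_line.endswith("]"):
--                 break
--             output_str += stripped_line + "\n"
--
--         if (
--             stripped_line.startswith("[")
--             and stripped_line.endswith("]")
--             and structure in stripped_line
--         ):
--             found_desired_structure = True
--
--     return output_str[:-1]
-- ===== SOURCE B (Python) =====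
-- def get_songtext_by_structure(content: list, structure: str) -> str:
--     stripped = [line.strip() for line in content]
--
--     def is_header(s):
--         return s.startswith("[") and s.endswith("]")
--
--     start = None
--     for i, s in enumerate(stripped):
--         if is_header(s) and structure in s:
--             start = i
--             break
--     if start is None:
--         return ""
--
--     body = []
--     for s in stripped[start + 1:]:
--         if is_header(s):
--             break
--         body.append(s)
--     return "\n".join(body)
-- ===== Notes on version B (the rewrite author's own statement) =====
-- stated objective: simpler
-- what changed: Replaces A's flag-driven single pass accumulating a string with a two-phase computation: first locate the matching header with enumerate, then collect the following stripped lines up to the next header and join them with '\n'.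
import Mathlib
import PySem

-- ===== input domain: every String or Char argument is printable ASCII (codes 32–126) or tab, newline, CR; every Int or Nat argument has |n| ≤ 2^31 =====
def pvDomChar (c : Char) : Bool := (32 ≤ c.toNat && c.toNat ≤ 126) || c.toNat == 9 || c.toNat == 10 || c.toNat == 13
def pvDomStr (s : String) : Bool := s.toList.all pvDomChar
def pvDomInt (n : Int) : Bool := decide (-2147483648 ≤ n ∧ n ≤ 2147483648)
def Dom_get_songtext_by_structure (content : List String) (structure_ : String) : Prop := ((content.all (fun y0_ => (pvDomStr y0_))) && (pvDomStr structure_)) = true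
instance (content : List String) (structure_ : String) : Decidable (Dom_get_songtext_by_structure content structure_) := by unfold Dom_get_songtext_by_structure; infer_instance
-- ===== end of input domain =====

-- B replaces A's flag-driven single pass by a locate-then-extract two-phase computation (objective: simpler).

-- ===== PORT A =====
-- A's for-loop as structural recursion over the remaining lines with its (found, output_str)
-- state; the growing string is carried as List Char (Python concatenation is exact there);
-- returning `out` at the end of the list or at `break` mirrors leaving the loop.
def pvGoA (structure_ : String) : List String → Bool → List Char → List Char
  | [], _, out => out
  | line :: rest, found, out =>
    let sl := PySem.Str.strip line
    if found then
      if PySem.Str.startswith sl "[" && PySem.Str.endswith sl "]" then out  -- break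
      else pvGoA structure_ rest true (out ++ sl.toList ++ ['\n'])
    else
      if PySem.Str.startswith sl "[" && PySem.Str.endswith sl "]" && PySem.Str.isIn structure_ sl then
        pvGoA structure_ rest true out
      else pvGoA structure_ rest false out

-- output_str[:-1] drops the last character (empty stays empty): exactly List.dropLast
def get_songtext_by_structure (content : List String) (structure_ : String) : String :=
  String.ofList ((pvGoA structure_ content false []).dropLast)

-- ===== PORT B =====
def pvIsHeader (s : String) : Bool := PySem.Str.startswith s "[" && PySem.Str.endswith s "]"

def get_songtext_by_structure_alt (content : List String) (structure_ : String) : String :=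
  let stripped := content.map (fun l => PySem.Str.strip l)
  match stripped.findIdx? (fun s => pvIsHeader s && PySem.Str.isIn structure_ s) with
  | none => ""
  | some i => PySem.Str.join "\n" ((stripped.drop (i + 1)).takeWhile (fun s => !pvIsHeader s))

-- ===== PRECONDITION & SPEC =====
def Spec_get_songtext_by_structure (content : List String) (structure_ : String) (out : String) : Prop := out = get_songtext_by_structure_alt content structure_
instance (content : List String) (structure_ : String) (out : String) : Decidable (Spec_get_songtext_by_structure content structure_ out) := by unfold Spec_get_songtext_by_structure; infer_instance

-- ===== CLAIM (what is proved, stated in full; the proofs are below) =====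
def Claim_equal_get_songtext_by_structure : Prop := ∀ (content : List String) (structure_ : String), Dom_get_songtext_by_structure content structure_ → Spec_get_songtext_by_structure content structure_ (get_songtext_by_structure content structure_)

-- ===== LEMMAS AND PROOFS =====

-- body produced by A's found-phase: stripped lines up to the next header, each with '\n'
def pvBody (rest : List String) : List Char :=
  ((rest.map (fun l => PySem.Str.strip l)).takeWhile (fun s => !pvIsHeader s)).flatMap
    (fun s => s.toList ++ ['\n'])

lemma pvGoA_found (structure_ : String) (rest : List String) (out : List Char) :
    pvGoA structure_ rest true out = out ++ pvBody rest := by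
  induction rest generalizing out with
  | nil => simp [pvGoA, pvBody]
  | cons r rs ih =>
    simp only [pvGoA]
    by_cases h : (PySem.Str.startswith (PySem.Str.strip r) "[" &&
        PySem.Str.endswith (PySem.Str.strip r) "]") = true
    · rw [if_pos trivial, if_pos h]
      have h2 : pvIsHeader (PySem.Str.strip r) = true := by simpa [pvIsHeader] using h
      unfold pvBody
      rw [List.map_cons, List.takeWhile_cons, if_neg (by simp [h2])]
      simp
    · rw [if_pos trivial, if_neg h, ih]
      have h' : pvIsHeader (PySem.Str.strip r) = false := by
        simpa [pvIsHeader] using h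
      simp [pvBody, h', List.append_assoc]

lemma pvBody_dropLast (rest : List String) :
    (pvBody rest).dropLast =
      PySem.Chars.join ['\n']
        (((rest.map (fun l => PySem.Str.strip l)).takeWhile (fun s => !pvIsHeader s)).map String.toList) := by
  unfold pvBody
  generalize (rest.map (fun l => PySem.Str.strip l)).takeWhile (fun s => !pvIsHeader s) = parts
  induction parts with
  | nil => simp [PySem.Chars.join_nil]
  | cons p ps ih =>
    cases ps with
    | nil => simp [PySem.Chars.join_singleton]
    | cons q qs =>
      have hne : List.flatMap (fun s => s.toList ++ ['\n']) (q :: qs) ≠ [] := by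
        simp [List.flatMap_cons]
      rw [show List.flatMap (fun s => s.toList ++ ['\n']) (p :: q :: qs) =
            (p.toList ++ ['\n']) ++ List.flatMap (fun s => s.toList ++ ['\n']) (q :: qs) by
          simp [List.flatMap_cons]]
      rw [List.dropLast_append_of_ne_nil hne, ih]
      simp only [List.map_cons, PySem.Chars.join_cons_cons]

lemma pvMain (structure_ : String) (content : List String) :
    (pvGoA structure_ content false []).dropLast =
      (get_songtext_by_structure_alt content structure_).toList := by
  induction content with
  | nil => simp [pvGoA, get_songtext_by_structure_alt]
  | cons line rest ih =>
    simp only [pvGoA, Bool.false_eq_true, if_false]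
    by_cases h : (PySem.Str.startswith (PySem.Str.strip line) "[" &&
        PySem.Str.endswith (PySem.Str.strip line) "]" &&
        PySem.Str.isIn structure_ (PySem.Str.strip line)) = true
    · rw [if_pos h, pvGoA_found, List.nil_append, pvBody_dropLast]
      simp only [get_songtext_by_structure_alt, List.map_cons]
      rw [List.findIdx?_cons]
      have h' : (pvIsHeader (PySem.Str.strip line) &&
          PySem.Str.isIn structure_ (PySem.Str.strip line)) = true := by
        simpa [pvIsHeader, Bool.and_assoc] using h
      simp only [h', if_true, List.drop_succ_cons, List.drop_zero]
      simp [PySem.Str.toList_join]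
    · rw [if_neg h, ih]
      have h' : (pvIsHeader (PySem.Str.strip line) &&
          PySem.Str.isIn structure_ (PySem.Str.strip line)) = false := by
        have := h; simp [pvIsHeader, Bool.and_assoc] at this ⊢
        intro h1 h2; simpa [h1, h2] using this
      simp only [get_songtext_by_structure_alt, List.map_cons]
      rw [List.findIdx?_cons]
      simp only [h', Bool.false_eq_true, if_false]
      cases hfi : (rest.map (fun l => PySem.Str.strip l)).findIdx?
          (fun s => pvIsHeader s && PySem.Str.isIn structure_ s) with
      | none => simp
      | some i => simp [List.drop_succ_cons]

-- ===== VERDICT (by name: the statement is the Claim_ definition above) =====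
theorem get_songtext_by_structure_spec : Claim_equal_get_songtext_by_structure := by
  intro content structure_ _
  unfold Spec_get_songtext_by_structure get_songtext_by_structure
  rw [pvMain]
  exact String.ofList_toList
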